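-- pv_equiv track=rewrite | github.com/ClarenceZZT/QRAirGap | receiver.py | _encode_ranges
-- ===== SOURCE A (Python) =====
-- def _encode_ranges(indices):
--     """Encode sorted indices as compact ranges: [1,2,3,5,6,8] -> '1-3,5-6,8'"""
--     if not indices:
--         return ""
--     s = sorted(indices)
--     ranges = []
--     start = end = s[0]
--     for i in s[1:]:
--         if i == end + 1:
--             end = i
--         else:
--             ranges.append("{}-{}".format(start, end) if start != end else str(start))
--             start = end = i
--     ranges.append("{}-{}".format(start, end) if start != end else str(start))
--     return ",".join(ranges)
-- ===== SOURCE B (Python) =====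
-- from itertools import groupby
--
-- def _encode_ranges(indices):
--     """Encode sorted indices as compact ranges: [1,2,3,5,6,8] -> '1-3,5-6,8'"""
--     if not indices:
--         return ""
--     s = sorted(indices)
--     pieces = []
--     for _, grp in groupby(enumerate(s), key=lambda p: p[1] - p[0]):
--         g = [v for _, v in grp]
--         a, b = g[0], g[-1]
--         pieces.append("{}-{}".format(a, b) if a != b else str(a))
--     return ",".join(pieces)
-- ===== Notes on version B (the rewrite author's own statement) =====
-- stated objective: idiomatic
-- what changed: Replaces A's stateful start/end accumulator loop with itertools.groupby over enumerate(sorted(s)) keyed by value-minus-position, so each maximal consecutive run is one group formatted from its first and last member.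
import Mathlib
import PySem

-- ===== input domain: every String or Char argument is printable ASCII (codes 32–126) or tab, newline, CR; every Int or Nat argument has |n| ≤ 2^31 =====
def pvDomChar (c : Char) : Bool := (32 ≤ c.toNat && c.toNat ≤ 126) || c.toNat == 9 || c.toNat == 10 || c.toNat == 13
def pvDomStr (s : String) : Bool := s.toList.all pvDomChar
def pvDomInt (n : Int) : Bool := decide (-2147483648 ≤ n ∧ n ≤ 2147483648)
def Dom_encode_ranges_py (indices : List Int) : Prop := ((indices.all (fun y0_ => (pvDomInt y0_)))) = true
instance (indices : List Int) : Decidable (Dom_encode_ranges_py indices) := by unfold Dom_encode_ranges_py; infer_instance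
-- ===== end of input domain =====

-- B replaces A's stateful start/end accumulator loop with an itertools.groupby over
-- enumerate(sorted(s)) keyed by value-minus-position (idiomatic decomposition, same cost).

-- ===== PORT A =====
-- "{}-{}".format(start, end) if start != end else str(start)
def pvFmtA (start e : Int) : String :=
  if start ≠ e then PySem.Str.join "-" [PySem.Int.toStr start, PySem.Int.toStr e]
  else PySem.Int.toStr start

def encode_ranges_py (indices : List Int) : String :=
  if indices = [] then ""
  else
    match PySem.List.sorted indices (fun x => x) false with
    | [] => ""  -- unreachable: sorted of a nonempty list is nonempty
    | h :: t =>
      let st := t.foldl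
        (fun (acc : List String × Int × Int) i =>
          if i = acc.2.2 + 1 then (acc.1, acc.2.1, i)
          else (acc.1 ++ [pvFmtA acc.2.1 acc.2.2], i, i))
        ([], h, h)
      PySem.Str.join "," (st.1 ++ [pvFmtA st.2.1 st.2.2])

-- ===== PORT B =====
-- itertools.groupby(pairs, key = λ(i,v). v - i), keeping only the values of each group
def pvGbAux (k : Int) (cur : List Int) : List (Int × Int) → List (List Int)
  | [] => [cur.reverse]
  | (i, v) :: rest =>
    if v - i = k then pvGbAux k (v :: cur) rest
    else cur.reverse :: pvGbAux (v - i) [v] rest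

def pvGroups : List (Int × Int) → List (List Int)
  | [] => []
  | (i, v) :: rest => pvGbAux (v - i) [v] rest

-- g[0], g[-1] of a group
def pvPiece (g : List Int) : String :=
  match PySem.List.pyGet? g 0, PySem.List.pyGet? g (-1) with
  | some a, some b => pvFmtA a b
  | _, _ => ""  -- unreachable: groupby groups are nonempty

def encode_ranges_py_alt (indices : List Int) : String :=
  if indices = [] then ""
  else
    let s := PySem.List.sorted indices (fun x => x) false
    PySem.Str.join "," ((pvGroups (PySem.List.enumerate s 0)).map pvPiece)

-- ===== PRECONDITION & SPEC =====
def Spec_encode_ranges_py (indices : List Int) (out : String) : Prop := out = encode_ranges_py_alt indices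
instance (indices : List Int) (out : String) : Decidable (Spec_encode_ranges_py indices out) := by unfold Spec_encode_ranges_py; infer_instance

-- ===== CLAIM (what is proved, stated in full; the proofs are below) =====
def Claim_equal_encode_ranges_py : Prop := ∀ (indices : List Int), Dom_encode_ranges_py indices → Spec_encode_ranges_py indices (encode_ranges_py indices)

-- ===== LEMMAS AND PROOFS =====

-- common intermediate: the (start, end) pairs of the maximal consecutive runs
def pvRuns (start e : Int) : List Int → List (Int × Int)
  | [] => [(start, e)]
  | i :: t => if i = e + 1 then pvRuns start i t else (start, e) :: pvRuns i i t

theorem loopA (t : List Int) : ∀ (racc : List String) (start e : Int),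
    (t.foldl
      (fun (acc : List String × Int × Int) i =>
        if i = acc.2.2 + 1 then (acc.1, acc.2.1, i)
        else (acc.1 ++ [pvFmtA acc.2.1 acc.2.2], i, i))
      (racc, start, e)).1
    ++ [pvFmtA
        (t.foldl
          (fun (acc : List String × Int × Int) i =>
            if i = acc.2.2 + 1 then (acc.1, acc.2.1, i)
            else (acc.1 ++ [pvFmtA acc.2.1 acc.2.2], i, i))
          (racc, start, e)).2.1
        (t.foldl
          (fun (acc : List String × Int × Int) i =>
            if i = acc.2.2 + 1 then (acc.1, acc.2.1, i)
            else (acc.1 ++ [pvFmtA acc.2.1 acc.2.2], i, i))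
          (racc, start, e)).2.2]
    = racc ++ (pvRuns start e t).map (fun p => pvFmtA p.1 p.2) := by
  induction t with
  | nil => intro racc start e; simp [pvRuns]
  | cons i t ih =>
    intro racc start e
    by_cases h : i = e + 1
    · subst h; simp [pvRuns, ih]
    · simp [pvRuns, h, ih]

theorem pvPiece_reverse (e : Int) (rest : List Int) :
    pvPiece ((e :: rest).reverse) = pvFmtA ((e :: rest).getLast (by simp)) e := by
  unfold pvPiece
  have h0 : PySem.List.pyGet? ((e :: rest).reverse) 0 = some ((e :: rest).getLast (by simp)) := by
    rw [PySem.List.pyGet?_zero, ← List.head?_eq_getElem?, List.head?_reverse,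
      List.getLast?_eq_some_getLast]
  have h1 : PySem.List.pyGet? ((e :: rest).reverse) (-1) = some e := by
    have hrev : (e :: rest).reverse = rest.reverse ++ [e] := by simp
    rw [hrev, PySem.List.pyGet?_neg_one_append_singleton]
  rw [h0, h1]

theorem loopB (t : List Int) : ∀ (n e : Int) (rest : List Int),
    (pvGbAux (e - n) (e :: rest) (PySem.List.enumerate t (n + 1))).map pvPiece
    = (pvRuns ((e :: rest).getLast (by simp)) e t).map (fun p => pvFmtA p.1 p.2) := by
  induction t with
  | nil =>
    intro n e rest
    simp only [PySem.List.enumerate_nil, pvGbAux, pvRuns, List.map_cons, List.map_nil]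
    rw [pvPiece_reverse]
  | cons i t ih =>
    intro n e rest
    rw [PySem.List.enumerate_cons]
    simp only [pvGbAux, pvRuns]
    by_cases h : i = e + 1
    · subst h
      rw [if_pos (by omega : e + 1 - (n + 1) = e - n), if_pos rfl]
      have hih := ih (n + 1) (e + 1) (e :: rest)
      rw [(by omega : e + 1 - (n + 1) = e - n)] at hih
      exact hih
    · rw [if_neg (by omega : ¬ (i - (n + 1) = e - n)), if_neg h]
      simp only [List.map_cons]
      rw [pvPiece_reverse, ih (n + 1) i []]
      simp [List.getLast_singleton]

-- ===== VERDICT (by name: the statement is the Claim_ definition above) =====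
theorem encode_ranges_py_spec : Claim_equal_encode_ranges_py := by
  intro indices _
  unfold Spec_encode_ranges_py encode_ranges_py encode_ranges_py_alt
  by_cases hnil : indices = []
  · simp [hnil]
  · rw [if_neg hnil, if_neg hnil]
    have hs : PySem.List.sorted indices (fun x => x) false ≠ [] := by
      rw [Ne, PySem.List.sorted_eq_nil_iff]; exact hnil
    obtain ⟨h, t, hht⟩ := List.exists_cons_of_ne_nil hs
    rw [hht]
    simp only []
    congr 1
    have hA := loopA t [] h h
    simp only [List.nil_append] at hA
    have hB : (pvGroups (PySem.List.enumerate (h :: t) 0)).map pvPiece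
        = (pvRuns h h t).map (fun p => pvFmtA p.1 p.2) := by
      rw [PySem.List.enumerate_cons]
      show (pvGbAux (h - 0) [h] (PySem.List.enumerate t (0 + 1))).map pvPiece = _
      have hb := loopB t 0 h []
      simpa using hb
    rw [hB, ← hA]
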